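-- pv_equiv track=rewrite | github.com/Al-Asl/RegexInference | Benchmarks/exp_gen.py | InfixClosureSizeIsOK
-- ===== SOURCE A (Python) =====
-- def InfixesOf(word):
--     ic = set()
--     for i in range(len(word) + 1):
--         for j in range(len(word) - i + 1):
--             ic.add(word[j : i + j])
--     return ic
--
-- def InfixClosureSizeIsOK(pos, neg, MaxSizeOfInfixClosure):
--     ic = set()
--     for p in pos:
--         ic |= InfixesOf(p)
--     for n in neg:
--         ic |= InfixesOf(n)
--     if len(ic) > MaxSizeOfInfixClosure:
--         return False
--     return True
-- ===== SOURCE B (Python) =====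
-- def InfixClosureSizeIsOK(pos, neg, MaxSizeOfInfixClosure):
--     words = pos + neg
--     if not words:
--         return 0 <= MaxSizeOfInfixClosure
--     sufs = sorted(w[j:] for w in words for j in range(len(w)))
--     count = 1  # the empty substring
--     prev = ""
--     for s in sufs:
--         k = 0
--         while k < len(prev) and k < len(s) and prev[k] == s[k]:
--             k += 1
--         count = count + len(s) - k
--         if count > MaxSizeOfInfixClosure:
--             return False
--         prev = s
--     return count <= MaxSizeOfInfixClosure
-- ===== Notes on version B (the rewrite author's own statement) =====
-- stated objective: alternative
-- what changed: B never materializes the substring set: it counts distinct substrings arithmetically as 1 + sum over the lexicographically sorted suffixes of (suffix length minus longest common prefix with the previous suffix), with an early False exit when the running count crosses the threshold; A enumerates all O(L^2) substrings of every word into a set.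
import Mathlib
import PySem

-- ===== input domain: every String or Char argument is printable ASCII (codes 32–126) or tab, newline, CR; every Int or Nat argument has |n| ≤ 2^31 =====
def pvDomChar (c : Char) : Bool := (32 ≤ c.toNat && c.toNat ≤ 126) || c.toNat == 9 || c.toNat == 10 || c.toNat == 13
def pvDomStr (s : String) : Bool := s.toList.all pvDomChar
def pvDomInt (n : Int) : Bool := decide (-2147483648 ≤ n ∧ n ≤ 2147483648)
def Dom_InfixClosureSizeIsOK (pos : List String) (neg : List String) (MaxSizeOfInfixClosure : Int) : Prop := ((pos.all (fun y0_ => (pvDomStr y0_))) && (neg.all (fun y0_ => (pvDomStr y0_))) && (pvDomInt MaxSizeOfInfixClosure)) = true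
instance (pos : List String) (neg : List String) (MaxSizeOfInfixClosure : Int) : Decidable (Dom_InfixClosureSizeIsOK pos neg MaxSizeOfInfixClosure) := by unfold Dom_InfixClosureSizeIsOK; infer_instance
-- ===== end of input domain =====

-- B counts the distinct substrings without building the substring set: it sorts all nonempty
-- suffixes of all words and sums (length - lcp with the previous suffix), with an early False
-- exit once the running count exceeds the threshold (objective: alternative algorithm).

-- ===== PORT A =====
def InfixesOf (word : String) : PySem.Set String :=
  (PySem.List.pyRange 0 ((word.toList.length : Int) + 1) 1).foldl (fun ic i =>
    (PySem.List.pyRange 0 ((word.toList.length : Int) - i + 1) 1).foldl (fun ic j =>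
      PySem.Set.add ic (PySem.Str.slice word (some j) (some (i + j)))) ic)
    PySem.Set.empty

def InfixClosureSizeIsOK (pos : List String) (neg : List String) (MaxSizeOfInfixClosure : Int) : Bool :=
  let ic0 : PySem.Set String := PySem.Set.empty
  let ic1 := pos.foldl (fun ic p => PySem.Set.union ic (InfixesOf p)) ic0
  let ic2 := neg.foldl (fun ic n => PySem.Set.union ic (InfixesOf n)) ic1
  if PySem.Set.len ic2 > MaxSizeOfInfixClosure then false else true

-- ===== PORT B =====
-- the inner `while` loop of Source B: count matching leading characters
def pvLcp : List Char → List Char → Nat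
  | a :: p, b :: q => if a = b then pvLcp p q + 1 else 0
  | _, _ => 0

-- the `for s in sufs` loop of Source B, with its early `return False`
def pvCountLoop : List String → String → Int → Int → Bool
  | [], _, count, mx => decide (count ≤ mx)
  | s :: rest, prev, count, mx =>
    let count' := count + PySem.Str.len s - (pvLcp prev.toList s.toList : Int)
    if count' > mx then false else pvCountLoop rest s count' mx

def InfixClosureSizeIsOK_alt (pos : List String) (neg : List String) (MaxSizeOfInfixClosure : Int) : Bool :=
  let words := pos ++ neg
  if words = [] then decide ((0 : Int) ≤ MaxSizeOfInfixClosure)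
  else
    let sufs := PySem.List.sorted
      (words.flatMap (fun w => (PySem.List.pyRange 0 (PySem.Str.len w) 1).map
        (fun j => PySem.Str.slice w (some j) none)))
      (fun x => x) false
    pvCountLoop sufs "" 1 MaxSizeOfInfixClosure

-- ===== PRECONDITION & SPEC =====
def Spec_InfixClosureSizeIsOK (pos : List String) (neg : List String) (MaxSizeOfInfixClosure : Int) (out : Bool) : Prop := out = InfixClosureSizeIsOK_alt pos neg MaxSizeOfInfixClosure
instance (pos : List String) (neg : List String) (MaxSizeOfInfixClosure : Int) (out : Bool) : Decidable (Spec_InfixClosureSizeIsOK pos neg MaxSizeOfInfixClosure out) := by unfold Spec_InfixClosureSizeIsOK; infer_instance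

-- ===== CLAIM (what is proved, stated in full; the proofs are below) =====
def Claim_equal_InfixClosureSizeIsOK : Prop := ∀ (pos : List String) (neg : List String) (MaxSizeOfInfixClosure : Int), Dom_InfixClosureSizeIsOK pos neg MaxSizeOfInfixClosure → Spec_InfixClosureSizeIsOK pos neg MaxSizeOfInfixClosure (InfixClosureSizeIsOK pos neg MaxSizeOfInfixClosure)

-- ===== LEMMAS AND PROOFS =====

-- ---------- generic fold facts (membership / nodup of A's set-building folds) ----------
theorem pv_mem_foldl_gen {β : Type} (P : β → String → Prop) (g : List String → β → List String)
    (hg : ∀ s i x, x ∈ g s i ↔ x ∈ s ∨ P i x) :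
    ∀ (l : List β) (s : List String) (x : String),
      x ∈ l.foldl g s ↔ x ∈ s ∨ ∃ i ∈ l, P i x := by
  intro l
  induction l with
  | nil => simp
  | cons a l ih =>
    intro s x
    simp only [List.foldl_cons, ih, hg, List.mem_cons]
    constructor
    · rintro ((h | h) | ⟨i, hi, hP⟩)
      · exact Or.inl h
      · exact Or.inr ⟨a, Or.inl rfl, h⟩
      · exact Or.inr ⟨i, Or.inr hi, hP⟩
    · rintro (h | ⟨i, (rfl | hi), hP⟩)
      · exact Or.inl (Or.inl h)
      · exact Or.inl (Or.inr hP)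
      · exact Or.inr ⟨i, hi, hP⟩

theorem pv_nodup_foldl_gen {β : Type} (g : List String → β → List String)
    (hg : ∀ s i, s.Nodup → (g s i).Nodup) :
    ∀ (l : List β) (s : List String), s.Nodup → (l.foldl g s).Nodup := by
  intro l
  induction l with
  | nil => intro s hs; exact hs
  | cons a l ih => intro s hs; exact ih _ (hg s a hs)

-- ---------- membership characterisation of A's final set ----------
theorem pv_mem_InfixesOf (w : String) (x : String) :
    x ∈ InfixesOf w ↔
      ∃ i j : Int, 0 ≤ i ∧ i < (w.toList.length : Int) + 1 ∧ 0 ≤ j ∧ j < (w.toList.length : Int) - i + 1 ∧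
        x = PySem.Str.slice w (some j) (some (i + j)) := by
  unfold InfixesOf
  rw [pv_mem_foldl_gen
      (fun i x => ∃ j ∈ PySem.List.pyRange 0 ((w.toList.length : Int) - i + 1) 1,
        x = PySem.Str.slice w (some j) (some (i + j)))
      _ (fun s i x => PySem.Set.mem_foldl_add _ _ s x)]
  simp only [PySem.Set.empty, List.not_mem_nil, false_or, PySem.List.mem_pyRange_one]
  constructor
  · rintro ⟨i, ⟨hi0, hi1⟩, j, ⟨hj0, hj1⟩, hx⟩
    exact ⟨i, j, hi0, hi1, hj0, hj1, hx⟩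
  · rintro ⟨i, j, hi0, hi1, hj0, hj1, hx⟩
    exact ⟨i, ⟨hi0, hi1⟩, j, ⟨hj0, hj1⟩, hx⟩

theorem pv_mem_Aset (pos neg : List String) (x : String) :
    x ∈ neg.foldl (fun ic n => PySem.Set.union ic (InfixesOf n))
          (pos.foldl (fun ic p => PySem.Set.union ic (InfixesOf p)) PySem.Set.empty) ↔
      ∃ w ∈ pos ++ neg, x ∈ InfixesOf w := by
  rw [pv_mem_foldl_gen (fun w x => x ∈ InfixesOf w) _
      (fun s w x => PySem.Set.mem_union s (InfixesOf w) x),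
    pv_mem_foldl_gen (fun w x => x ∈ InfixesOf w) _
      (fun s w x => PySem.Set.mem_union s (InfixesOf w) x)]
  simp only [PySem.Set.empty, List.not_mem_nil, false_or, List.mem_append]
  constructor
  · rintro (⟨w, hw, hx⟩ | ⟨w, hw, hx⟩)
    · exact ⟨w, Or.inl hw, hx⟩
    · exact ⟨w, Or.inr hw, hx⟩
  · rintro ⟨w, (hw | hw), hx⟩
    · exact Or.inl ⟨w, hw, hx⟩
    · exact Or.inr ⟨w, hw, hx⟩

theorem pv_nodup_Aset (pos neg : List String) :
    (neg.foldl (fun ic n => PySem.Set.union ic (InfixesOf n))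
      (pos.foldl (fun ic p => PySem.Set.union ic (InfixesOf p)) PySem.Set.empty)).Nodup := by
  refine pv_nodup_foldl_gen _ (fun s w hs => PySem.Set.nodup_union s (InfixesOf w) hs) _ _ ?_
  refine pv_nodup_foldl_gen _ (fun s w hs => PySem.Set.nodup_union s (InfixesOf w) hs) _ _ ?_
  exact List.nodup_nil

theorem pv_slice_toList (s : String) (a b : Option Int) :
    (PySem.Str.slice s a b).toList = PySem.List.slice s.toList a b := by
  simp [PySem.Str.slice]

-- x is an element of InfixesOf w iff x's characters are a prefix of some suffix of w's characters
theorem pv_mem_InfixesOf_iff_prefix (w : String) (x : String) :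
    x ∈ InfixesOf w ↔ ∃ j : Nat, j ≤ w.toList.length ∧ x.toList <+: w.toList.drop j := by
  rw [pv_mem_InfixesOf]
  constructor
  · rintro ⟨i, j, hi0, hi1, hj0, hj1, rfl⟩
    refine ⟨j.toNat, by omega, ?_⟩
    have hslice : PySem.List.slice w.toList (some j) (some (i + j)) =
        (w.toList.drop j.toNat).take ((i + j).toNat - j.toNat) :=
      PySem.List.slice_toNat w.toList (by omega) (by omega)
    have hx : (PySem.Str.slice w (some j) (some (i + j))).toList =
        (w.toList.drop j.toNat).take ((i + j).toNat - j.toNat) := by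
      simp [PySem.Str.slice, hslice]
    rw [hx]
    exact List.take_prefix _ _
  · rintro ⟨j, hj, hp⟩
    have hlen : x.toList.length ≤ w.toList.length - j := by
      have := hp.length_le
      rwa [List.length_drop] at this
    refine ⟨(x.toList.length : Int), (j : Int), by omega, by omega, by omega, by omega, ?_⟩
    apply String.toList_inj.mp
    have h1 := PySem.List.slice_toNat w.toList
      (a := (j : Int)) (b := (x.toList.length : Int) + (j : Int)) (by omega) (by omega)
    have h2 : ((x.toList.length : Int) + (j : Int)).toNat - ((j : Int)).toNat = x.toList.length := by
      omega
    have h3 : ((j : Int)).toNat = j := by omega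
    have hslice : (PySem.Str.slice w (some (j : Int))
        (some ((x.toList.length : Int) + (j : Int)))).toList =
        (w.toList.drop j).take x.toList.length := by
      rw [pv_slice_toList, h1, h2, h3]
    rw [hslice]
    exact List.prefix_iff_eq_take.mp hp

-- ---------- lex-order and lcp toolkit ----------
theorem pv_nil_le (l : List Char) : ([] : List Char) ≤ l := by
  rcases l with _ | ⟨x, t⟩
  · exact le_refl _
  · exact le_of_lt (List.Lex.nil)

theorem pv_cons_le_cons (a b : List Char) (x y : Char) (h : (x :: a) ≤ (y :: b)) :
    x < y ∨ (x = y ∧ a ≤ b) := by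
  rcases lt_or_eq_of_le h with h | h
  · cases h with
    | cons h => exact Or.inr ⟨rfl, le_of_lt h⟩
    | rel h => exact Or.inl h
  · injection h with h1 h2
    exact Or.inr ⟨h1, le_of_eq h2⟩

theorem pv_not_cons_le_nil (x : Char) (a : List Char) : ¬ ((x :: a) ≤ ([] : List Char)) := by
  intro h
  rcases lt_or_eq_of_le h with h | h
  · cases h
  · exact List.cons_ne_nil _ _ h

-- a common prefix of a and c is a prefix of anything lexicographically between them
theorem pv_prefix_between : ∀ (p a b c : List Char),
    p <+: a → p <+: c → a ≤ b → b ≤ c → p <+: b := by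
  intro p
  induction p with
  | nil => intro a b c _ _ _ _; exact List.nil_prefix
  | cons x p ih =>
    intro a b c hpa hpc hab hbc
    obtain ⟨a', rfl⟩ := hpa
    obtain ⟨c', rfl⟩ := hpc
    rcases b with _ | ⟨y, b'⟩
    · exact absurd hab (pv_not_cons_le_nil _ _)
    · rcases pv_cons_le_cons _ _ _ _ hab with h1 | ⟨rfl, hab'⟩
      · rcases pv_cons_le_cons _ _ _ _ hbc with h2 | ⟨rfl, _⟩
        · exact absurd (lt_trans h1 h2) (lt_irrefl _)
        · exact absurd h1 (lt_irrefl _)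
      · rcases pv_cons_le_cons _ _ _ _ hbc with h2 | ⟨_, hbc'⟩
        · exact absurd h2 (lt_irrefl _)
        · obtain ⟨t, ht⟩ := ih _ _ _ (List.prefix_append p a') (List.prefix_append p c') hab' hbc'
          exact ⟨t, by rw [List.cons_append, ht]⟩

theorem pv_lcp_le_right : ∀ (a b : List Char), pvLcp a b ≤ b.length := by
  intro a
  induction a with
  | nil => intro b; simp [pvLcp]
  | cons x a ih =>
    intro b
    rcases b with _ | ⟨y, b⟩
    · simp [pvLcp]
    · simp only [pvLcp]
      split
      · simpa using Nat.succ_le_succ (ih b)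
      · simp

theorem pv_lcp_le_left : ∀ (a b : List Char), pvLcp a b ≤ a.length := by
  intro a
  induction a with
  | nil => intro b; simp [pvLcp]
  | cons x a ih =>
    intro b
    rcases b with _ | ⟨y, b⟩
    · simp [pvLcp]
    · simp only [pvLcp]
      split
      · simpa using Nat.succ_le_succ (ih b)
      · simp

theorem pv_lcp_take : ∀ (a b : List Char), a.take (pvLcp a b) = b.take (pvLcp a b) := by
  intro a
  induction a with
  | nil => intro b; simp [pvLcp]
  | cons x a ih =>
    intro b
    rcases b with _ | ⟨y, b⟩
    · simp [pvLcp]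
    · simp only [pvLcp]
      split
      · rename_i h
        simp [List.take_succ_cons, h, ih b]
      · simp

theorem pv_lcp_max : ∀ (p a b : List Char), p <+: a → p <+: b → p.length ≤ pvLcp a b := by
  intro p
  induction p with
  | nil => intro a b _ _; simp
  | cons x p ih =>
    intro a b hpa hpb
    obtain ⟨a', rfl⟩ := hpa
    obtain ⟨b', rfl⟩ := hpb
    simp only [List.cons_append, pvLcp, List.length_cons, if_pos]
    exact Nat.succ_le_succ (ih _ _ (List.prefix_append p a') (List.prefix_append p b'))

-- ---------- the count fold and the prefix finsets ----------
def pvCnt : List String → String → Nat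
  | [], _ => 0
  | s :: r, prev => (s.toList.length - pvLcp prev.toList s.toList) + pvCnt r s

def pvPrefFinset (s : String) : Finset String :=
  (Finset.range (s.toList.length + 1)).image (fun k => String.ofList (s.toList.take k))

def pvUnionPrefs : List String → Finset String
  | [] => ∅
  | s :: r => pvPrefFinset s ∪ pvUnionPrefs r

theorem pv_mem_pvPrefFinset (s x : String) :
    x ∈ pvPrefFinset s ↔ x.toList <+: s.toList := by
  unfold pvPrefFinset
  simp only [Finset.mem_image, Finset.mem_range]
  constructor
  · rintro ⟨k, _, rfl⟩
    simp only [String.toList_ofList]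
    exact List.take_prefix _ _
  · intro h
    refine ⟨x.toList.length, by have := h.length_le; omega, ?_⟩
    apply String.toList_inj.mp
    simp only [String.toList_ofList]
    exact (List.prefix_iff_eq_take.mp h).symm
  
theorem pv_mem_pvUnionPrefs (ss : List String) (x : String) :
    x ∈ pvUnionPrefs ss ↔ ∃ s ∈ ss, x.toList <+: s.toList := by
  induction ss with
  | nil => simp [pvUnionPrefs]
  | cons s r ih => simp [pvUnionPrefs, ih, pv_mem_pvPrefFinset]

-- ---------- the counting argument over the sorted suffix list ----------
theorem pv_card_step (P : Finset String) (prev s : String)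
    (hps : prev ≤ s)
    (hP1 : ∀ p ∈ P, ∃ t : String, t ≤ prev ∧ p.toList <+: t.toList)
    (hP2 : ∀ q : String, q.toList <+: prev.toList → q ∈ P) :
    (P ∪ pvPrefFinset s).card = P.card + (s.toList.length - pvLcp prev.toList s.toList) := by
  set L := pvLcp prev.toList s.toList with hL
  have hLs : L ≤ s.toList.length := pv_lcp_le_right _ _
  have hLp : L ≤ prev.toList.length := pv_lcp_le_left _ _
  set N : Finset String :=
    (Finset.Icc (L + 1) s.toList.length).image (fun k => String.ofList (s.toList.take k)) with hN
  -- elements of N are prefixes of s of length > L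
  have hNmem : ∀ x ∈ N, x.toList <+: s.toList ∧ L < x.toList.length := by
    intro x hx
    rw [hN] at hx
    simp only [Finset.mem_image, Finset.mem_Icc] at hx
    obtain ⟨k, ⟨hk1, hk2⟩, rfl⟩ := hx
    simp only [String.toList_ofList]
    refine ⟨List.take_prefix _ _, ?_⟩
    rw [List.length_take]
    omega
  -- N is disjoint from P
  have hdisj : Disjoint P N := by
    rw [Finset.disjoint_left]
    intro x hxP hxN
    obtain ⟨hpre, hlen⟩ := hNmem x hxN
    obtain ⟨t, ht, hpt⟩ := hP1 x hxP
    have hbetween : x.toList <+: prev.toList :=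
      pv_prefix_between _ _ _ _ hpt hpre
        (String.le_iff_toList_le.mp ht)
        (String.le_iff_toList_le.mp hps)
    have := pv_lcp_max _ _ _ hbetween hpre
    omega
  -- the union with all prefixes of s is the union with just the new long ones
  have hunion : P ∪ pvPrefFinset s = P ∪ N := by
    apply Finset.ext
    intro x
    simp only [Finset.mem_union]
    constructor
    · rintro (h | h)
      · exact Or.inl h
      · rw [pv_mem_pvPrefFinset] at h
        by_cases hlen : x.toList.length ≤ L
        · -- short prefixes of s are prefixes of prev, hence already in P
          refine Or.inl (hP2 x ?_)
          have h1 : x.toList <+: s.toList.take L := List.prefix_take_iff.mpr ⟨h, hlen⟩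
          rw [← pv_lcp_take prev.toList s.toList] at h1
          exact h1.trans (List.take_prefix _ _)
        · refine Or.inr ?_
          rw [hN]
          simp only [Finset.mem_image, Finset.mem_Icc]
          refine ⟨x.toList.length, ⟨by omega, h.length_le⟩, ?_⟩
          apply String.toList_inj.mp
          simp only [String.toList_ofList]
          exact (List.prefix_iff_eq_take.mp h).symm
    · rintro (h | h)
      · exact Or.inl h
      · refine Or.inr ?_
        rw [pv_mem_pvPrefFinset]
        exact (hNmem x h).1
  have hcardN : N.card = s.toList.length - L := by
    rw [hN]
    rw [Finset.card_image_of_injOn]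
    · rw [Nat.card_Icc]; omega
    · intro k1 hk1 k2 hk2 he
      simp only [Finset.coe_Icc, Set.mem_Icc] at hk1 hk2
      have h1 : (String.ofList (s.toList.take k1)).toList.length = k1 := by
        rw [String.toList_ofList, List.length_take]; omega
      have h2 : (String.ofList (s.toList.take k2)).toList.length = k2 := by
        rw [String.toList_ofList, List.length_take]; omega
      have he' : String.ofList (s.toList.take k1) = String.ofList (s.toList.take k2) := he
      rw [← h1, ← h2, he']
  rw [hunion, Finset.card_union_of_disjoint hdisj, hcardN]

theorem pv_core : ∀ (ss : List String) (prev : String) (P : Finset String),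
    ss.Pairwise (· ≤ ·) → (∀ s ∈ ss, prev ≤ s) →
    (∀ p ∈ P, ∃ t : String, t ≤ prev ∧ p.toList <+: t.toList) →
    (∀ q : String, q.toList <+: prev.toList → q ∈ P) →
    P.card + pvCnt ss prev = (P ∪ pvUnionPrefs ss).card := by
  intro ss
  induction ss with
  | nil => intro prev P _ _ _ _; simp [pvCnt, pvUnionPrefs]
  | cons s r ih =>
    intro prev P hpair hall hP1 hP2
    have hps : prev ≤ s := hall s (List.mem_cons_self ..)
    have hstep := pv_card_step P prev s hps hP1 hP2
    have hIH := ih s (P ∪ pvPrefFinset s)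
      (List.pairwise_cons.mp hpair).2
      (fun t ht => (List.pairwise_cons.mp hpair).1 t ht)
      (by
        intro p hp
        rcases Finset.mem_union.mp hp with h | h
        · obtain ⟨t, ht, hpt⟩ := hP1 p h
          exact ⟨t, le_trans ht hps, hpt⟩
        · exact ⟨s, le_refl s, (pv_mem_pvPrefFinset s p).mp h⟩)
      (by
        intro q hq
        exact Finset.mem_union.mpr (Or.inr ((pv_mem_pvPrefFinset s q).mpr hq)))
    have hassoc : P ∪ pvPrefFinset s ∪ pvUnionPrefs r = P ∪ pvUnionPrefs (s :: r) := by
      show _ = P ∪ (pvPrefFinset s ∪ pvUnionPrefs r)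
      rw [Finset.union_assoc]
    rw [hassoc] at hIH
    simp only [pvCnt]
    omega

-- ---------- B's loop is "total count, then compare" (the early exit is sound) ----------
theorem pv_loop_eq : ∀ (ss : List String) (prev : String) (c mx : Int),
    pvCountLoop ss prev c mx = decide (c + (pvCnt ss prev : Int) ≤ mx) := by
  intro ss
  induction ss with
  | nil => intro prev c mx; simp [pvCountLoop, pvCnt]
  | cons s r ih =>
    intro prev c mx
    have hL : pvLcp prev.toList s.toList ≤ s.toList.length := pv_lcp_le_right _ _
    have hlen : PySem.Str.len s = (s.toList.length : Int) := by simp [pysem]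
    simp only [pvCountLoop, pvCnt]
    split
    · rename_i h
      rw [hlen] at h
      symm
      simp only [decide_eq_false_iff_not]
      omega
    · rename_i h
      rw [hlen, ih, decide_eq_decide]
      omega

-- ---------- the substrings of the words are exactly "" plus the prefixes of the suffixes ----------
theorem pv_suffix_list_mem (words : List String) (x : String) :
    x ∈ words.flatMap (fun w => (PySem.List.pyRange 0 (PySem.Str.len w) 1).map
        (fun j => PySem.Str.slice w (some j) none)) ↔
      ∃ w ∈ words, ∃ j : Nat, j < w.toList.length ∧ x.toList = w.toList.drop j := by
  simp only [List.mem_flatMap, List.mem_map, PySem.List.mem_pyRange_one, PySem.Str.len_eq]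
  constructor
  · rintro ⟨w, hw, j, ⟨hj0, hj1⟩, rfl⟩
    refine ⟨w, hw, j.toNat, by omega, ?_⟩
    have hslice : PySem.List.slice w.toList (some j) none = w.toList.drop j.toNat :=
      PySem.List.slice_from w.toList (a := j) hj0
    simp [PySem.Str.slice, hslice]
  · rintro ⟨w, hw, j, hj, hx⟩
    refine ⟨w, hw, (j : Int), ⟨by omega, by omega⟩, ?_⟩
    apply String.toList_inj.mp
    have hslice : PySem.List.slice w.toList (some (j : Int)) none = w.toList.drop j :=
      by rw [PySem.List.slice_from w.toList (a := (j : Int)) (by omega)]; norm_num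
    simp [PySem.Str.slice, hslice, hx]

-- ===== VERDICT (by name: the statement is the Claim_ definition above) =====
theorem InfixClosureSizeIsOK_spec : Claim_equal_InfixClosureSizeIsOK := by
  intro pos neg mx _
  unfold Spec_InfixClosureSizeIsOK InfixClosureSizeIsOK InfixClosureSizeIsOK_alt
  simp only []
  set Aset := neg.foldl (fun ic n => PySem.Set.union ic (InfixesOf n))
      (pos.foldl (fun ic p => PySem.Set.union ic (InfixesOf p)) PySem.Set.empty) with hAset
  by_cases hwords : pos ++ neg = []
  · -- no words at all: A's set is empty
    rw [List.append_eq_nil_iff] at hwords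
    obtain ⟨rfl, rfl⟩ := hwords
    by_cases h : (0 : Int) ≤ mx
    · simp [PySem.Set.len, PySem.Set.empty, Aset, h]
    · simp [PySem.Set.len, PySem.Set.empty, Aset, h]
      omega
  · rw [if_neg hwords]
    set sufsRaw := (pos ++ neg).flatMap (fun w => (PySem.List.pyRange 0 (PySem.Str.len w) 1).map
        (fun j => PySem.Str.slice w (some j) none)) with hsufsRaw
    set sufs := PySem.List.sorted sufsRaw (fun x => x) false with hsufs
    -- sortedness
    have hpair : sufs.Pairwise (· ≤ ·) := by
      have := PySem.List.sorted_pairwise sufsRaw (fun x => x)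
      simpa using this
    have hmin : ∀ s ∈ sufs, ("" : String) ≤ s := by
      intro s _
      rw [String.le_iff_toList_le, String.toList_empty]
      exact pv_nil_le _
    -- the core count
    have hcore := pv_core sufs "" {""} hpair hmin
      (by
        intro p hp
        rw [Finset.mem_singleton] at hp
        subst hp
        exact ⟨"", le_refl _, List.prefix_refl _⟩)
      (by
        intro q hq
        rw [String.toList_empty, List.prefix_nil] at hq
        rw [Finset.mem_singleton]
        exact String.toList_inj.mp (by simp [hq]))
    rw [Finset.card_singleton] at hcore
    -- A's set as a finset
    have hnodup := pv_nodup_Aset pos neg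
    have hlen : Aset.length = Aset.toFinset.card := (List.toFinset_card_of_nodup hnodup).symm
    have hsetseq : Aset.toFinset = {""} ∪ pvUnionPrefs sufs := by
      apply Finset.ext
      intro x
      rw [List.mem_toFinset, hAset, pv_mem_Aset]
      simp only [Finset.mem_union, Finset.mem_singleton, pv_mem_pvUnionPrefs]
      constructor
      · rintro ⟨w, hw, hx⟩
        rw [pv_mem_InfixesOf_iff_prefix] at hx
        obtain ⟨j, hj, hpre⟩ := hx
        by_cases hjlt : j < w.toList.length
        · refine Or.inr ⟨PySem.Str.slice w (some (j : Int)) none, ?_, ?_⟩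
          · rw [hsufs, PySem.List.mem_sorted, hsufsRaw, pv_suffix_list_mem]
            refine ⟨w, hw, j, hjlt, ?_⟩
            have hslice : PySem.List.slice w.toList (some (j : Int)) none = w.toList.drop j :=
              by rw [PySem.List.slice_from w.toList (a := (j : Int)) (by omega)]; norm_num
            simp [PySem.Str.slice, hslice]
          · have hslice : PySem.List.slice w.toList (some (j : Int)) none = w.toList.drop j :=
              by rw [PySem.List.slice_from w.toList (a := (j : Int)) (by omega)]; norm_num
            simpa [PySem.Str.slice, hslice] using hpre
        · -- j = length: the suffix is empty, so x = ""
          have : j = w.toList.length := by omega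
          subst this
          rw [List.drop_length, List.prefix_nil] at hpre
          exact Or.inl (String.toList_inj.mp (by simp [hpre]))
      · rintro (rfl | ⟨s, hs, hpre⟩)
        · -- "" is a substring of any word; words is nonempty
          rcases List.exists_mem_of_ne_nil _ hwords with ⟨w, hw⟩
          refine ⟨w, hw, ?_⟩
          rw [pv_mem_InfixesOf_iff_prefix]
          exact ⟨0, by omega, by simp⟩
        · rw [hsufs, PySem.List.mem_sorted, hsufsRaw, pv_suffix_list_mem] at hs
          obtain ⟨w, hw, j, hj, hsx⟩ := hs
          refine ⟨w, hw, ?_⟩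
          rw [pv_mem_InfixesOf_iff_prefix]
          exact ⟨j, by omega, by rw [← hsx]; exact hpre⟩
    -- finish
    rw [pv_loop_eq]
    have hcard : Aset.length = 1 + pvCnt sufs "" := by
      rw [hlen, hsetseq, ← hcore]
    have hcardI : (Aset.length : Int) = 1 + (pvCnt sufs "" : Int) := by
      rw [hcard]; push_cast; ring
    simp only [PySem.Set.len]
    by_cases h : (Aset.length : Int) > mx
    · rw [if_pos h]
      symm
      simp only [decide_eq_false_iff_not]
      omega
    · rw [if_neg h]
      symm
      simp only [decide_eq_true_iff]
      omega
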